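-- pv_equiv track=rewrite | github.com/BK-Yoo/algospot | hackerrank/week35/lucky_purchase.py | is_right_price
-- ===== SOURCE A (Python) =====
-- def is_right_price(price):
--     fours = 0
--     sevens = 0
--     for num in price:
--         if num == '4':
--             fours += 1
--         elif num == '7':
--             sevens += 1
--         else:
--             return False
--     return fours == sevens
-- ===== SOURCE B (Python) =====
-- def is_right_price(price):
--     n = len(price)
--     return n % 2 == 0 and sorted(price) == ['4'] * (n // 2) + ['7'] * (n // 2)
-- ===== Notes on version B (the rewrite author's own statement) =====
-- stated objective: alternative
-- what changed: Replaces the single validating-and-counting loop by a sort-based canonical-form check: the string is lucky iff its length is even and sorted(price) equals the canonical list of n/2 fours followed by n/2 sevens.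
import Mathlib
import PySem

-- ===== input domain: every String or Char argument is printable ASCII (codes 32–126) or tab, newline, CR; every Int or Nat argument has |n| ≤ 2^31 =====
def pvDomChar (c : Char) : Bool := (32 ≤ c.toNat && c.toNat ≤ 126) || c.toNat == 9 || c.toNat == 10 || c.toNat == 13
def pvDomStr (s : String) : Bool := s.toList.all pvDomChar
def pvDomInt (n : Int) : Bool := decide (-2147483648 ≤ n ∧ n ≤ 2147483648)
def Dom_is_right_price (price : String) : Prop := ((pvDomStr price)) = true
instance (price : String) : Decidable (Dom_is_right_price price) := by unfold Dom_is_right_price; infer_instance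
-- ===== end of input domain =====

-- B replaces A's validating-and-counting loop by a sort-based canonical-form check:
-- the string is lucky iff its length is even and sorted(price) = n/2 fours then n/2 sevens.

-- ===== PORT A =====
-- the for-loop with early 'return False': structural recursion carrying both counters
def is_right_price_go (cs : List Char) (fours sevens : Int) : Bool :=
  match cs with
  | [] => fours == sevens
  | num :: rest =>
    if num = '4' then is_right_price_go rest (fours + 1) sevens
    else if num = '7' then is_right_price_go rest fours (sevens + 1)
    else false

def is_right_price (price : String) : Bool :=
  is_right_price_go price.toList 0 0

-- ===== PORT B =====
def is_right_price_alt (price : String) : Bool :=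
  let cs := price.toList
  let n := cs.length
  (n % 2 == 0) &&
    (PySem.List.sorted cs (fun c => c) false ==
      List.replicate (n / 2) '4' ++ List.replicate (n / 2) '7')

-- ===== PRECONDITION & SPEC =====
def Spec_is_right_price (price : String) (out : Bool) : Prop := out = is_right_price_alt price
instance (price : String) (out : Bool) : Decidable (Spec_is_right_price price out) := by unfold Spec_is_right_price; infer_instance

-- ===== CLAIM (what is proved, stated in full; the proofs are below) =====
def Claim_equal_is_right_price : Prop := ∀ (price : String), Dom_is_right_price price → Spec_is_right_price price (is_right_price price)

-- ===== LEMMAS AND PROOFS =====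

-- A's loop computes: all chars valid, and the two running counters end equal.
theorem is_right_price_go_eq (cs : List Char) (fours sevens : Int) :
    is_right_price_go cs fours sevens =
      ((cs.all (fun c => c = '4' || c = '7')) &&
        (fours + (cs.count '4' : Int) == sevens + (cs.count '7' : Int))) := by
  induction cs generalizing fours sevens with
  | nil => simp [is_right_price_go]
  | cons c rest ih =>
    by_cases h4 : c = '4'
    · subst h4
      have hc7 : List.count '7' ('4' :: rest) = List.count '7' rest := by
        simp
      rw [show is_right_price_go ('4' :: rest) fours sevens =
            is_right_price_go rest (fours + 1) sevens from rfl, ih,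
          List.count_cons_self, hc7]
      simp only [List.all_cons, decide_true, Bool.true_or, Bool.true_and]
      have : fours + 1 + (List.count '4' rest : Int)
           = fours + ((List.count '4' rest : Int) + 1) := by ring
      rw [this]; push_cast; ring_nf
    · by_cases h7 : c = '7'
      · subst h7
        have hc4 : List.count '4' ('7' :: rest) = List.count '4' rest := by
          simp
        rw [show is_right_price_go ('7' :: rest) fours sevens =
              if ('7' : Char) = '4' then is_right_price_go rest (fours + 1) sevens
              else is_right_price_go rest fours (sevens + 1) from rfl,
            if_neg h4, ih, hc4, List.count_cons_self]
        simp only [List.all_cons, decide_true, Bool.or_true, Bool.true_and]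
        have : sevens + 1 + (List.count '7' rest : Int)
             = sevens + ((List.count '7' rest : Int) + 1) := by ring
        rw [this]; push_cast; ring_nf
      · simp [is_right_price_go, h4, h7]

-- the canonical sorted form of a lucky string
theorem canonical_pairwise (h : Nat) :
    (List.replicate h '4' ++ List.replicate h '7').Pairwise (fun a b : Char => a ≤ b) := by
  apply List.pairwise_append.2
  refine ⟨List.pairwise_replicate.2 (Or.inr le_rfl),
    List.pairwise_replicate.2 (Or.inr le_rfl), ?_⟩
  intro a ha b hb
  rw [List.eq_of_mem_replicate ha, List.eq_of_mem_replicate hb]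
  decide

-- the core characterisation: "all valid and counts equal" ↔ "even length and sorted = canonical"
theorem core_iff (cs : List Char) :
    ((∀ c ∈ cs, c = '4' ∨ c = '7') ∧ cs.count '4' = cs.count '7') ↔
      (cs.length % 2 = 0 ∧
        PySem.List.sorted cs (fun c => c) false =
          List.replicate (cs.length / 2) '4' ++ List.replicate (cs.length / 2) '7') := by
  constructor
  · rintro ⟨hval, hcnt⟩
    have hlen : cs.length = cs.count '4' + cs.count '7' := by
      clear hcnt
      induction cs with
      | nil => simp
      | cons c rest ih =>
        have hrest := ih (fun x hx => hval x (List.mem_cons_of_mem _ hx))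
        rcases hval c List.mem_cons_self with rfl | rfl <;>
          simp [hrest] <;> omega
    have hmod : cs.length % 2 = 0 := by omega
    have hdiv : cs.length / 2 = cs.count '7' := by omega
    refine ⟨hmod, ?_⟩
    rw [hdiv]
    apply PySem.List.sorted_id_eq_of_perm_of_pairwise
    · rw [List.perm_iff_count]
      intro a
      by_cases a4 : a = '4'
      · subst a4; simp [List.count_replicate, hcnt]
      · by_cases a7 : a = '7'
        · subst a7; simp [List.count_replicate]
        · have hnm : a ∉ cs := fun hm => by rcases hval a hm with rfl | rfl <;> simp_all
          simp [List.count_eq_zero_of_not_mem hnm, List.count_replicate,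
            Ne.symm a4, Ne.symm a7]
    · exact canonical_pairwise _
  · rintro ⟨hmod, hsort⟩
    have hperm : cs.Perm (List.replicate (cs.length / 2) '4' ++ List.replicate (cs.length / 2) '7') := by
      rw [← hsort]
      exact (PySem.List.sorted_perm cs (fun c => c) false).symm
    constructor
    · intro c hc
      have := hperm.mem_iff.1 hc
      rcases List.mem_append.1 this with hm | hm
      · exact Or.inl (List.eq_of_mem_replicate hm)
      · exact Or.inr (List.eq_of_mem_replicate hm)
    · have h4 := hperm.count_eq '4'
      have h7 := hperm.count_eq '7'
      simp [List.count_replicate] at h4 h7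
      omega

-- ===== VERDICT (by name: the statement is the Claim_ definition above) =====
theorem is_right_price_spec : Claim_equal_is_right_price := by
  intro price _
  unfold Spec_is_right_price is_right_price is_right_price_alt
  rw [is_right_price_go_eq, Bool.eq_iff_iff]
  simp only [Bool.and_eq_true, List.all_eq_true, Bool.or_eq_true, decide_eq_true_eq,
    beq_iff_eq, zero_add, Int.natCast_inj]
  exact core_iff price.toList
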